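-- pv_equiv track=rewrite | github.com/GeorgeLansdown/RADNAMES-HEHE | RADNAMES.py | generate
-- ===== SOURCE A (Python) =====
-- def generate(name):
-- 	name = name.split(" ")
-- 	newName = ""
-- 	for n in name:
-- 		if n.split("-") != n:
-- 			for f in n.split("-"):
-- 				if f[0].lower() not in ['a','e','i','o','u']:
-- 					newName += f[0]
-- 				newName += "onk "
-- 		else:
-- 			if n[0].lower() not in ['a','e','i','o','u']:
-- 				newName += n[0]
-- 				newName += "onk "
-- 	return newName
-- ===== SOURCE B (Python) =====
-- def generate(name):
--     # single left-to-right character scan: no splitting, a start-of-token flag instead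
--     out = []
--     start = True
--     for c in name:
--         if c in ' -':
--             start = True
--         elif start:
--             if c.lower() not in 'aeiou':
--                 out.append(c)
--             out.append('onk ')
--             start = False
--     return ''.join(out)
-- ===== Notes on version B (the rewrite author's own statement) =====
-- stated objective: alternative
-- what changed: B replaces A's split-on-spaces-then-split-on-hyphens nested token loops with a single character-level state-machine scan of the raw string (a start-of-token flag, no splitting at all).
-- outside the precondition, e.g. on generate(' '): A raises IndexError, B returns ''; on generate('-'): A raises IndexError, B returns ''
import Mathlib
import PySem

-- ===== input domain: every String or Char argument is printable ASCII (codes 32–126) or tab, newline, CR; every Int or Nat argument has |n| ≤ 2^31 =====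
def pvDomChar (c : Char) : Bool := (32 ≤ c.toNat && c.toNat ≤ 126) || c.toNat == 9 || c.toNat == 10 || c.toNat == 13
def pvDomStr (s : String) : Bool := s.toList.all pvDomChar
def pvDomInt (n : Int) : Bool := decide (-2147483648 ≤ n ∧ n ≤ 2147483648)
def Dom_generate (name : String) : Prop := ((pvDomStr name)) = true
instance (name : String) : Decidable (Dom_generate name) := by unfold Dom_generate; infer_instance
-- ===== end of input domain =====

-- B scans the raw string once with a start-of-token flag (a character state machine) instead of
-- A's nested split-on-space / split-on-hyphen loops; where A raises IndexError on empty tokens, B skips them.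


-- ===== PORT A =====
def pvVowels : List Char := ['a', 'e', 'i', 'o', 'u']

def generate (name : String) : String :=
  -- name = name.split(" ")
  let nameWords := PySem.Chars.splitOn name.toList [' ']
  -- newName = ""; for n in nameWords: …
  let newName := nameWords.foldl (fun newName n =>
    -- `n.split("-") != n` compares a LIST with a STRING in Python: always True, so the branch is
    -- always taken; the else branch below is dead code, transliterated anyway.
    if true then
      (PySem.Chars.splitOn n ['-']).foldl (fun acc f =>
        match PySem.List.pyGet? f 0 with   -- f[0]; none = IndexError, those inputs are outside Pre_
        | some c =>
            (if (PySem.Chars.lowerChar c ∈ pvVowels) = false then acc ++ [c] else acc)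
              ++ ("onk ".toList)
        | none => acc) newName
    else
      match PySem.List.pyGet? n 0 with     -- n[0]; dead branch in Python
      | some c =>
          if (PySem.Chars.lowerChar c ∈ pvVowels) = false then
            (newName ++ [c]) ++ ("onk ".toList)
          else newName
      | none => newName) []
  String.ofList newName

-- ===== PORT B =====
-- one step of Source B's character scan: state = (out, start flag)
def pvScanStep (st : List Char × Bool) (c : Char) : List Char × Bool :=
  if c ∈ [' ', '-'] then (st.1, true)                        -- c in ' -'
  else if st.2 then
    ((if PySem.Chars.lowerChar c ∈ pvVowels then st.1 else st.1 ++ [c]) ++ ("onk ".toList), false)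
  else (st.1, false)

def generate_alt (name : String) : String :=
  String.ofList (name.toList.foldl pvScanStep ([], true)).1

-- ===== PRECONDITION & SPEC =====
-- Pre_ excludes exactly the names containing an empty token (empty name, leading/trailing ' ' or '-',
-- or two adjacent separators): Python A raises IndexError there (f[0] on an empty part).
def Pre_generate (name : String) : Prop :=
  ∀ t ∈ PySem.Chars.splitOn (PySem.Chars.replace name.toList ['-'] [' ']) [' '], t ≠ []
instance (name : String) : Decidable (Pre_generate name) := by unfold Pre_generate; infer_instance

def pvWitness_generate : String := "Mary-Jane q Smith"

def Spec_generate (name : String) (out : String) : Prop := out = generate_alt name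
instance (name : String) (out : String) : Decidable (Spec_generate name out) := by
  unfold Spec_generate; infer_instance

-- ===== CLAIM (what is proved, stated in full; the proofs are below) =====
def Claim_equal_generate : Prop :=
  ∀ (name : String), Dom_generate name → Pre_generate name → Spec_generate name (generate name)

-- ===== LEMMAS AND PROOFS =====

-- s.replace('-', ' ') is the character map sending '-' to ' '.
def pvSub (c : Char) : Char := if c = '-' then ' ' else c

-- splitting a list of chars on one separator character, structurally.
def pvSplitC (c : Char) : List Char → List (List Char)
  | [] => [[]]
  | x :: s =>
      if x = c then [] :: pvSplitC c s
      else
        match pvSplitC c s with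
        | [] => [[x]]        -- unreachable: pvSplitC never returns []
        | t :: r => (x :: t) :: r

theorem pvSplitC_ne_nil (c : Char) (l : List Char) : pvSplitC c l ≠ [] := by
  cases l with
  | nil => simp [pvSplitC]
  | cons x s =>
      simp only [pvSplitC]
      split
      · simp
      · split <;> simp

theorem pvReplace_go_single (fuel : Nat) (l acc : List Char) (h : l.length ≤ fuel) :
    PySem.Chars.replace.go ['-'] [' '] fuel l acc = acc.reverse ++ l.map pvSub := by
  induction l generalizing fuel acc with
  | nil => cases fuel <;> simp [PySem.Chars.replace.go]
  | cons x s ih =>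
      cases fuel with
      | zero => simp at h
      | succ fuel =>
          simp only [PySem.Chars.replace.go, List.isPrefixOf]
          by_cases hx : x = '-'
          · subst hx
            simp only [List.length_cons] at h
            simp [ih fuel _ (by omega), pvSub]
          · have : ('-' == x) = false := by simp [Ne.symm hx]
            simp only [List.length_cons] at h
            simp [this, ih fuel _ (by omega), pvSub, hx]

theorem pvReplace_single (l : List Char) :
    PySem.Chars.replace l ['-'] [' '] = l.map pvSub := by
  simp [PySem.Chars.replace, pvReplace_go_single l.length l [] (le_refl _)]

-- prepend `pre` to the first piece
def pvMapHead (pre : List Char) : List (List Char) → List (List Char)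
  | [] => [pre]
  | t :: r => (pre ++ t) :: r

theorem pvSplitOn_go_single (c : Char) (fuel : Nat) (l cur : List Char)
    (acc : List (List Char)) (h : l.length ≤ fuel) :
    PySem.Chars.splitOn.go [c] fuel l cur acc
      = acc.reverse ++ pvMapHead cur.reverse (pvSplitC c l) := by
  induction l generalizing fuel cur acc with
  | nil => cases fuel <;> simp [PySem.Chars.splitOn.go, pvSplitC, pvMapHead]
  | cons x s ih =>
      cases fuel with
      | zero => simp at h
      | succ fuel =>
          simp only [List.length_cons] at h
          simp only [PySem.Chars.splitOn.go, List.isPrefixOf]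
          by_cases hx : c = x
          · subst hx
            simp only [List.length_singleton, List.drop_succ_cons, List.drop_zero]
            rw [ih fuel [] _ (by omega)]
            have hsne := pvSplitC_ne_nil c s
            cases hsp : pvSplitC c s with
            | nil => exact absurd hsp hsne
            | cons t r => simp [pvSplitC, pvMapHead, hsp]
          · rw [if_neg (by simp [hx])]
            rw [ih fuel (x :: cur) acc (by omega)]
            have hsne := pvSplitC_ne_nil c s
            simp only [pvSplitC, if_neg (Ne.symm hx)]
            cases hsp : pvSplitC c s with
            | nil => exact absurd hsp hsne
            | cons t r => simp [pvMapHead]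

theorem pvSplitOn_single (c : Char) (l : List Char) :
    PySem.Chars.splitOn l [c] = pvSplitC c l := by
  rw [PySem.Chars.splitOn, pvSplitOn_go_single c (l.length + 1) l [] [] (by omega)]
  have := pvSplitC_ne_nil c l
  cases h : pvSplitC c l with
  | nil => exact absurd h this
  | cons t r => simp [pvMapHead]

-- the key flattening fact: splitting the substituted string on ' ' is the flat list of
-- hyphen-splits of the space-splits.
theorem pvSplit_map_sub (l : List Char) :
    pvSplitC ' ' (l.map pvSub) = (pvSplitC ' ' l).flatMap (fun t => pvSplitC '-' t) := by
  induction l with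
  | nil => simp [pvSplitC]
  | cons x s ih =>
      by_cases hsp : x = ' '
      · subst hsp
        simp [pvSplitC, pvSub, ih]
      · by_cases hh : x = '-'
        · subst hh
          have hne := pvSplitC_ne_nil ' ' s
          cases hs : pvSplitC ' ' s with
          | nil => exact absurd hs hne
          | cons t r =>
              simp only [List.map_cons, pvSub, pvSplitC,
                if_neg (by decide : ¬ ('-' : Char) = ' '), hs]
              rw [ih, hs]
              simp [pvSplitC]
        · have hne := pvSplitC_ne_nil ' ' s
          cases hs : pvSplitC ' ' s with
          | nil => exact absurd hs hne
          | cons t r =>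
              have hsub : pvSub x = x := by simp [pvSub, hh]
              simp only [List.map_cons, hsub, pvSplitC, if_neg hsp, hs]
              rw [ih, hs]
              have hne2 := pvSplitC_ne_nil '-' t
              cases ht : pvSplitC '-' t with
              | nil => exact absurd ht hne2
              | cons u v => simp [pvSplitC, if_neg hh, ht]

-- A's per-token step, over the flat token list.
def pvAStep (acc : List Char) (f : List Char) : List Char :=
  match PySem.List.pyGet? f 0 with
  | some c =>
      (if (PySem.Chars.lowerChar c ∈ pvVowels) = false then acc ++ [c] else acc)
        ++ ("onk ".toList)
  | none => acc

-- B's scan over l from state (acc, b) equals A's fold over the tokens of l (dropping the first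
-- token when b = false: the scan is mid-token there), provided those tokens are nonempty.
theorem pvScan_eq_fold (l : List Char) (acc : List Char) (b : Bool)
    (h : ∀ t ∈ (if b then pvSplitC ' ' (l.map pvSub)
                else (pvSplitC ' ' (l.map pvSub)).tail), t ≠ []) :
    (l.foldl pvScanStep (acc, b)).1
      = (if b then pvSplitC ' ' (l.map pvSub)
         else (pvSplitC ' ' (l.map pvSub)).tail).foldl pvAStep acc := by
  induction l generalizing acc b with
  | nil =>
      cases b with
      | true => exact absurd rfl (h [] (by simp [pvSplitC]))
      | false => simp [pvSplitC]
  | cons x s ih =>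
      by_cases hsep : x ∈ [' ', '-']
      · have hsub : pvSub x = ' ' := by
          rcases (by simpa using hsep : x = ' ' ∨ x = '-') with h' | h' <;> simp [pvSub, h']
        have hsplit : pvSplitC ' ' (pvSub x :: s.map pvSub) = [] :: pvSplitC ' ' (s.map pvSub) := by
          simp [pvSplitC, hsub]
        cases b with
        | true => exact absurd rfl (h [] (by simp [hsplit]))
        | false =>
            simp only [List.foldl_cons, pvScanStep, if_pos hsep, List.map_cons, hsplit,
              List.tail_cons] at *
            exact ih acc true (by simpa using h)
      · have hsub : pvSub x = x := by
          simp only [List.mem_cons, List.not_mem_nil, or_false] at hsep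
          push Not at hsep
          simp [pvSub, hsep.2]
        have hne := pvSplitC_ne_nil ' ' (s.map pvSub)
        have hxsp : ¬ x = ' ' := by
          intro hx; exact hsep (by simp [hx])
        cases hs : pvSplitC ' ' (s.map pvSub) with
        | nil => exact absurd hs hne
        | cons t r =>
            have hsplit : pvSplitC ' ' (pvSub x :: s.map pvSub) = (x :: t) :: r := by
              simp [pvSplitC, hsub, hxsp, hs]
            cases b with
            | true =>
                have hr : ∀ u ∈ (if false then pvSplitC ' ' (s.map pvSub)
                                 else (pvSplitC ' ' (s.map pvSub)).tail), u ≠ [] := by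
                  intro u hu
                  rw [if_neg (by simp), hs, List.tail_cons] at hu
                  refine h u ?_
                  rw [if_pos rfl, List.map_cons, hsplit]
                  exact List.mem_cons_of_mem _ hu
                simp only [List.foldl_cons, pvScanStep, if_neg hsep, List.map_cons, hsplit]
                simp only [if_true]
                rw [List.foldl_cons]
                have hAeq : pvAStep acc (x :: t)
                    = (if PySem.Chars.lowerChar x ∈ pvVowels then acc else acc ++ [x])
                        ++ ("onk ".toList) := by
                  simp only [pvAStep, PySem.List.pyGet?, PySem.List.pyIdx?]
                  by_cases hv : PySem.Chars.lowerChar x ∈ pvVowels <;> simp [hv]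
                rw [hAeq]
                generalize (if PySem.Chars.lowerChar x ∈ pvVowels then acc else acc ++ [x])
                    ++ ("onk ".toList) = A
                have hrec := ih A false hr
                rw [if_neg (by simp), hs, List.tail_cons] at hrec
                exact hrec
            | false =>
                have hrec := ih acc false (by
                  intro u hu
                  rw [if_neg (by simp), hs, List.tail_cons] at hu
                  refine h u ?_
                  rw [if_neg (by simp), List.map_cons, hsplit, List.tail_cons]
                  exact hu)
                rw [if_neg (by simp), hs, List.tail_cons] at hrec
                simp only [List.foldl_cons, pvScanStep, if_neg hsep, List.map_cons, hsplit]
                simp only [if_neg (Bool.false_ne_true), List.tail_cons]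
                exact hrec

-- A's two-level fold is the flat fold of pvAStep over the combined tokens.
theorem pvA_flat (name : String) :
    generate name = String.ofList
      ((pvSplitC ' ' (name.toList.map pvSub)).foldl pvAStep []) := by
  unfold generate
  simp only [pvSplitOn_single, pvSplit_map_sub, List.foldl_flatMap, if_true]
  rfl

-- ===== VERDICT (by name: the statement is the Claim_ definition above) =====
theorem generate_spec : Claim_equal_generate := by
  intro name _hDom hPre
  show generate name = generate_alt name
  rw [pvA_flat]
  unfold generate_alt
  rw [pvScan_eq_fold name.toList [] true (by
    intro t ht
    apply hPre t
    simpa [pvReplace_single, pvSplitOn_single] using ht)]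
  rw [if_pos rfl]
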